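-- pv_equiv track=rewrite | github.com/mvendra/mvtools | codelint/plugins/lint_line_tidy.py | lint_cycle
-- ===== SOURCE A (Python) =====
-- def lint_cycle(plugins_params, filename, shared_state, line_index, content_line):
--
--     content_line_local = content_line
--
--     if len(content_line_local) == 0:
--         return True, None
--
--     indent_ratio = 4
--     indent_counter = 0
--
--     msg_indent = None
--     msg_trail = None
--     result_return = None
--
--     for c in content_line_local:
--         if c != " ":
--             break
--         indent_counter += 1
--         if indent_counter == indent_ratio:
--             indent_counter = 0
--
--     if indent_counter > 0:
--         msg_indent = "bad indentation detected"
--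
--     if content_line_local.endswith(" "):
--         msg_trail = "trailing spaces detected"
--
--     if (msg_indent is not None) or (msg_trail is not None): # either
--
--         patches_ret = []
--         inbetween_str = ""
--         local_first = ""
--         local_second = ""
--
--         if (msg_indent is not None) and (msg_trail is not None): # both
--             inbetween_str = ". "
--             local_first = msg_indent
--             local_second = msg_trail
--             patches_ret.append((line_index, content_line.rstrip()))
--
--         else: # only one of either
--             if msg_indent is not None:
--                 local_first = msg_indent
--             if msg_trail is not None:
--                 local_second = msg_trail
--                 patches_ret.append((line_index, content_line.rstrip()))
--
--         composed_msg = "%s%s%s" % (local_first, inbetween_str, local_second)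
--         final_msg = "[%s:%s]: %s." % (filename, line_index, composed_msg)
--         result_return = (final_msg, patches_ret)
--
--     return True, result_return
-- ===== SOURCE B (Python) =====
-- def lint_cycle(plugins_params, filename, shared_state, line_index, content_line):
--
--     if len(content_line) == 0:
--         return True, None
--
--     # indentation is OK iff the leading spaces are exactly a sequence of complete
--     # 4-space blocks: strip whole blocks recursively; a leftover partial block is bad
--     def indent_ok(s):
--         if not s.startswith(" "):
--             return True
--         if s.startswith("    "):
--             return indent_ok(s[4:])
--         return False
--
--     trailing = content_line[-1] == " "
--
--     table = {
--         (True, False): "bad indentation detected",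
--         (False, True): "trailing spaces detected",
--         (True, True): "bad indentation detected. trailing spaces detected",
--     }
--     msg = table.get((not indent_ok(content_line), trailing))
--     if msg is None:
--         return True, None
--
--     patches = [(line_index, content_line.rstrip())] if trailing else []
--     return True, ("[%s:%s]: %s." % (filename, line_index, msg), patches)
-- ===== Notes on version B (the rewrite author's own statement) =====
-- stated objective: alternative
-- what changed: Replaces A's mod-4 character counter loop by a recursive stripper of whole 4-space blocks (divisibility by repeated subtraction, no counter/mod), detects trailing spaces by inspecting the last character instead of endswith, and replaces A's four-variable message-assembly branch tree by a lookup of the three fully-spelled-out messages in a table keyed by the flag pair.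
import Mathlib
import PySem

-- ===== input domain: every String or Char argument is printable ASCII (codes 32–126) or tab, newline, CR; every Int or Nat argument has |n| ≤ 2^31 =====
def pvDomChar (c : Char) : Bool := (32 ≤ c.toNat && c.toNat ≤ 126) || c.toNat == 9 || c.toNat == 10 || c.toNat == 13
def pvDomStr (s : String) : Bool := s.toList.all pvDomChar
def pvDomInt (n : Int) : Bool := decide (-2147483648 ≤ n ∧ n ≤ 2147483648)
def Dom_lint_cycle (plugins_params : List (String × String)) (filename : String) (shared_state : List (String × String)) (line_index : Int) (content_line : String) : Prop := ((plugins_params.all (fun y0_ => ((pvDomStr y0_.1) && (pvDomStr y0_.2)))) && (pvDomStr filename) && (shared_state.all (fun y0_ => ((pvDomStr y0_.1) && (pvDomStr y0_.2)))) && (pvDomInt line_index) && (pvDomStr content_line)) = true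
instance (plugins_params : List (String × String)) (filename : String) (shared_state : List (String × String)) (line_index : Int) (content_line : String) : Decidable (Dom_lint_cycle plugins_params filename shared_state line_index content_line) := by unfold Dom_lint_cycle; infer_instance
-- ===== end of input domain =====

-- B replaces A's mod-4 counter loop by a recursive stripper of whole 4-space blocks,
-- checks trailing via the last character, and looks the composed message up in a table
-- keyed by the two flags (alternative decomposition, same cost).

-- ===== PORT A =====
-- A's for-loop over the line's characters: break at the first non-space, otherwise
-- increment the counter and reset it to 0 when it reaches 4.
def lintIndentCounter : List Char → Nat → Nat
  | [], k => k
  | c :: rest, k =>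
    if c ≠ ' ' then k
    else
      let k1 := k + 1
      let k2 := if k1 = 4 then 0 else k1
      lintIndentCounter rest k2

def lint_cycle (plugins_params : List (String × String)) (filename : String) (shared_state : List (String × String)) (line_index : Int) (content_line : String) : Bool × (Option (String × (List (Int × String)))) :=
  let content_line_local := content_line
  if PySem.Str.len content_line_local = 0 then (true, none)
  else
    let indent_counter := lintIndentCounter content_line_local.toList 0
    let msg_indent : Option String :=
      if indent_counter > 0 then some "bad indentation detected" else none
    let msg_trail : Option String :=
      if PySem.Str.endswith content_line_local " " then some "trailing spaces detected" else none
    if msg_indent.isSome || msg_trail.isSome then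
      -- patches_ret / inbetween_str / local_first / local_second, as in A's branch tree
      let (inbetween_str, local_first, local_second, patches_ret) :=
        if msg_indent.isSome && msg_trail.isSome then
          (". ", msg_indent.getD "", msg_trail.getD "",
           [(line_index, PySem.Str.rstrip content_line)])
        else
          let local_first := if msg_indent.isSome then msg_indent.getD "" else ""
          let (local_second, patches_ret) :=
            if msg_trail.isSome then
              (msg_trail.getD "", [(line_index, PySem.Str.rstrip content_line)])
            else ("", ([] : List (Int × String)))
          ("", local_first, local_second, patches_ret)
      -- "%s%s%s" and "[%s:%s]: %s." formatting = string concatenation (exact, via List Char)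
      let composed_msg := String.ofList (local_first.toList ++ inbetween_str.toList ++ local_second.toList)
      let final_msg := String.ofList ("[".toList ++ filename.toList ++ ":".toList ++ (PySem.Int.toStr line_index).toList ++ "]: ".toList ++ composed_msg.toList ++ ".".toList)
      (true, some (final_msg, patches_ret))
    else (true, none)

-- ===== PORT B =====
-- Source B's indent_ok: strip whole 4-space blocks recursively; a leftover partial block is bad
def lintIndentOk (cs : List Char) : Bool :=
  if ¬ PySem.Chars.startswith cs [' '] then true
  else if PySem.Chars.startswith cs [' ', ' ', ' ', ' '] then
    lintIndentOk (PySem.List.slice cs (some 4) none)   -- s[4:]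
  else false
termination_by cs.length
decreasing_by
  rename_i h1 h2
  rw [PySem.List.slice_from cs (by omega : (0:Int) ≤ 4)]
  have hne : cs ≠ [] := by rintro rfl; exact absurd h2 (by decide)
  have hpos : 0 < cs.length := List.length_pos_iff.2 hne
  simp only [List.length_drop]
  omega

def lint_cycle_alt (plugins_params : List (String × String)) (filename : String) (shared_state : List (String × String)) (line_index : Int) (content_line : String) : Bool × (Option (String × (List (Int × String)))) :=
  if PySem.Str.len content_line = 0 then (true, none)
  else
    -- content_line[-1] == " ": a one-code-point string comparison = char comparison (exact)
    let trailing := PySem.Str.pyGet? content_line (-1) == some ' '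
    let table : PySem.Dict (Bool × Bool) String := PySem.Dict.ofList
      [((true, false), "bad indentation detected"),
       ((false, true), "trailing spaces detected"),
       ((true, true), "bad indentation detected. trailing spaces detected")]
    match table.get? (!lintIndentOk content_line.toList, trailing) with
    | none => (true, none)
    | some msg =>
      let patches := if trailing then [(line_index, PySem.Str.rstrip content_line)] else []
      -- "[%s:%s]: %s." formatting = string concatenation (exact, via List Char)
      let final_msg := String.ofList ("[".toList ++ filename.toList ++ ":".toList ++ (PySem.Int.toStr line_index).toList ++ "]: ".toList ++ msg.toList ++ ".".toList)
      (true, some (final_msg, patches))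

-- ===== PRECONDITION & SPEC =====
def Spec_lint_cycle (plugins_params : List (String × String)) (filename : String) (shared_state : List (String × String)) (line_index : Int) (content_line : String) (out : Bool × (Option (String × (List (Int × String))))) : Prop := out = lint_cycle_alt plugins_params filename shared_state line_index content_line
instance (plugins_params : List (String × String)) (filename : String) (shared_state : List (String × String)) (line_index : Int) (content_line : String) (out : Bool × (Option (String × (List (Int × String))))) : Decidable (Spec_lint_cycle plugins_params filename shared_state line_index content_line out) := by unfold Spec_lint_cycle; infer_instance

-- ===== CLAIM =====
def Claim_equal_lint_cycle : Prop := ∀ (plugins_params : List (String × String)) (filename : String) (shared_state : List (String × String)) (line_index : Int) (content_line : String), Dom_lint_cycle plugins_params filename shared_state line_index content_line → Spec_lint_cycle plugins_params filename shared_state line_index content_line (lint_cycle plugins_params filename shared_state line_index content_line)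

-- ===== LEMMAS AND PROOFS =====

-- A's counter after the loop is the number of leading spaces modulo 4
theorem lintIndentCounter_eq (cs : List Char) : ∀ k : Nat, k < 4 →
    lintIndentCounter cs k = (k + (cs.takeWhile (· == ' ')).length) % 4 := by
  induction cs with
  | nil => intro k hk; simp [lintIndentCounter, Nat.mod_eq_of_lt hk]
  | cons c rest ih =>
    intro k hk
    by_cases hc : c = ' '
    · subst hc
      simp only [lintIndentCounter, List.takeWhile_cons, ne_eq, not_true_eq_false, if_false,
        beq_self_eq_true, ite_true]
      by_cases h4 : k + 1 = 4
      · rw [if_pos h4, ih 0 (by omega)]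
        simp [List.length_cons]
        omega
      · rw [if_neg h4, ih (k+1) (by omega)]
        simp [List.length_cons]
        omega
    · simp [lintIndentCounter, hc, List.takeWhile_cons, Nat.mod_eq_of_lt hk]

-- B's block stripper decides divisibility of the leading-space count by 4
theorem lintIndentOk_eq_aux (n : Nat) : ∀ cs : List Char, cs.length ≤ n →
    lintIndentOk cs = ((cs.takeWhile (· == ' ')).length % 4 == 0) := by
  induction n with
  | zero =>
    intro cs hlen
    have : cs = [] := List.eq_nil_of_length_eq_zero (Nat.le_zero.1 hlen)
    subst this
    rw [lintIndentOk]
    have hsw : PySem.Chars.startswith [] [' '] = false := by decide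
    simp [hsw]
  | succ n ih =>
    intro cs hlen
    rw [lintIndentOk]
    by_cases h1 : PySem.Chars.startswith cs [' '] = true
    · by_cases h2 : PySem.Chars.startswith cs [' ', ' ', ' ', ' '] = true
      · -- a full 4-space block: strip it and recurse
        rw [if_neg (by simp [h1]), if_pos h2]
        obtain ⟨rest, hcs⟩ := (PySem.Chars.startswith_iff _ _).1 h2
        rw [PySem.List.slice_from cs (by omega : (0:Int) ≤ 4), ← hcs]
        have hrest : rest.length ≤ n := by
          have := congrArg List.length hcs
          simp at this
          omega
        rw [show ((([' ', ' ', ' ', ' '] ++ rest)).drop (Int.toNat 4)) = rest from rfl]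
        rw [ih rest hrest]
        have htw : ((([' ', ' ', ' ', ' '] ++ rest)).takeWhile (· == ' ')).length
            = 4 + (rest.takeWhile (· == ' ')).length := by
          simp
          omega
        rw [htw, show (4 + (rest.takeWhile (· == ' ')).length) % 4
            = (rest.takeWhile (· == ' ')).length % 4 from by omega]
      · -- starts with a space but not with a full block: 1..3 leading spaces
        rw [if_neg (by simp [h1]), if_neg h2]
        obtain ⟨t, hcs⟩ := (PySem.Chars.startswith_iff _ _).1 h1
        have h4 : ¬ ([' ', ' ', ' ', ' '] <+: cs) := fun hp =>
          h2 ((PySem.Chars.startswith_iff _ _).2 hp)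
        have hl1 : 1 ≤ (cs.takeWhile (· == ' ')).length := by
          rw [← hcs]
          simp [List.takeWhile_cons]
        have hl3 : (cs.takeWhile (· == ' ')).length < 4 := by
          by_contra hge
          push_neg at hge
          apply h4
          have hpre : ((cs.takeWhile (· == ' ')).take 4) <+: cs :=
            (List.take_prefix _ _).trans (List.takeWhile_prefix _)
          have heq : (cs.takeWhile (· == ' ')).take 4 = [' ', ' ', ' ', ' '] := by
            rw [show ([' ', ' ', ' ', ' '] : List Char) = List.replicate 4 ' ' from rfl]
            rw [List.eq_replicate_iff]
            constructor
            · simp [List.length_take]; omega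
            · intro b hb
              have hbm := List.mem_takeWhile_imp (List.mem_of_mem_take hb)
              exact beq_iff_eq.1 hbm
          rwa [heq] at hpre
        have hzero : (cs.takeWhile (· == ' ')).length % 4 ≠ 0 := by
          rw [Nat.mod_eq_of_lt hl3]; omega
        simp [hzero]
    · -- no leading space at all
      rw [if_pos (by simpa using h1)]
      cases cs with
      | nil => simp
      | cons c t =>
        have hc : ¬ (c == ' ') = true := by
          intro hcc
          exact h1 ((PySem.Chars.startswith_iff _ _).2 ⟨t, by simp [beq_iff_eq.1 hcc]⟩)
        simp [List.takeWhile_cons, hc]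

theorem lintIndentOk_eq (cs : List Char) :
    lintIndentOk cs = ((cs.takeWhile (· == ' ')).length % 4 == 0) :=
  lintIndentOk_eq_aux cs.length cs le_rfl

-- trailing-space flag: endswith " " = last char is ' ' (nonempty list)
theorem endswith_last (cs : List Char) :
    PySem.Chars.endswith cs [' '] = (PySem.List.pyGet? cs (-1) == some ' ') := by
  have key : [' '] <:+ cs ↔ cs.getLast? = some ' ' := by
    constructor
    · rintro ⟨t, rfl⟩; simp
    · intro hg; obtain ⟨l', rfl⟩ := (List.getLast?_eq_some_iff).1 hg; exact ⟨l', rfl⟩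
  rw [Bool.eq_iff_iff]
  simp [PySem.Chars.endswith_iff, PySem.List.pyGet?_neg_one, key]

-- ===== VERDICT =====
theorem lint_cycle_spec : Claim_equal_lint_cycle := by
  intro plugins_params filename shared_state line_index content_line _
  unfold Spec_lint_cycle lint_cycle lint_cycle_alt
  by_cases hemp : content_line = ""
  · simp [hemp]
  · have hlen : ¬ (PySem.Str.len content_line = 0) := by
      simp [PySem.Str.len, hemp]
    rw [if_neg hlen, if_neg hlen]
    have hcnt : lintIndentCounter content_line.toList 0
        = (content_line.toList.takeWhile (· == ' ')).length % 4 := by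
      simpa using lintIndentCounter_eq content_line.toList 0 (by omega)
    have hok := lintIndentOk_eq content_line.toList
    have htr := endswith_last content_line.toList
    have hsTT : ("bad indentation detected".toList ++ (". ".toList ++ "trailing spaces detected".toList)) = "bad indentation detected. trailing spaces detected".toList := by decide
    have hnil : ("" : String).toList = [] := rfl
    by_cases hi : (content_line.toList.takeWhile (· == ' ')).length % 4 = 0
    · by_cases ht : PySem.List.pyGet? content_line.toList (-1) == some ' '
      · simp [hcnt, hok, htr, hi, ht, hnil, hsTT, PySem.Dict.get?, PySem.Dict.ofList,
          PySem.Dict.update, PySem.Dict.insert, PySem.Dict.empty, PySem.Dict.contains,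
          List.find?, Nat.pos_iff_ne_zero,
          show (((false, true) : Bool × Bool) == (false, false)) = false from rfl,
          show (((true, true) : Bool × Bool) == (false, false)) = false from rfl,
          show (((true, false) : Bool × Bool) == (false, false)) = false from rfl,
          show (((true, false) : Bool × Bool) == (false, true)) = false from rfl,
          show (((false, true) : Bool × Bool) == (false, true)) = true from rfl,
          show (((true, false) : Bool × Bool) == (true, false)) = true from rfl,
          show (((true, true) : Bool × Bool) == (true, false)) = false from rfl,
          show (((true, true) : Bool × Bool) == (true, true)) = true from rfl,
          show (((false, true) : Bool × Bool) == (true, false)) = false from rfl,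
          show (((false, true) : Bool × Bool) == (true, true)) = false from rfl,
          show (((true, false) : Bool × Bool) == (true, true)) = false from rfl]
      · simp [hcnt, hok, htr, hi, ht, hnil, hsTT, PySem.Dict.get?, PySem.Dict.ofList,
          PySem.Dict.update, PySem.Dict.insert, PySem.Dict.empty, PySem.Dict.contains,
          List.find?, Nat.pos_iff_ne_zero,
          show (((false, true) : Bool × Bool) == (false, false)) = false from rfl,
          show (((true, true) : Bool × Bool) == (false, false)) = false from rfl,
          show (((true, false) : Bool × Bool) == (false, false)) = false from rfl,
          show (((true, false) : Bool × Bool) == (false, true)) = false from rfl,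
          show (((false, true) : Bool × Bool) == (false, true)) = true from rfl,
          show (((true, false) : Bool × Bool) == (true, false)) = true from rfl,
          show (((true, true) : Bool × Bool) == (true, false)) = false from rfl,
          show (((true, true) : Bool × Bool) == (true, true)) = true from rfl,
          show (((false, true) : Bool × Bool) == (true, false)) = false from rfl,
          show (((false, true) : Bool × Bool) == (true, true)) = false from rfl,
          show (((true, false) : Bool × Bool) == (true, true)) = false from rfl]
    · have hib : ((content_line.toList.takeWhile (· == ' ')).length % 4 == 0) = false := by
        simp [hi]
      by_cases ht : PySem.List.pyGet? content_line.toList (-1) == some ' '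
      · simp [hcnt, hok, htr, hi, ht, hib, hnil, hsTT, PySem.Dict.get?, PySem.Dict.ofList,
          PySem.Dict.update, PySem.Dict.insert, PySem.Dict.empty, PySem.Dict.contains,
          List.find?, Nat.pos_iff_ne_zero,
          show (((false, true) : Bool × Bool) == (false, false)) = false from rfl,
          show (((true, true) : Bool × Bool) == (false, false)) = false from rfl,
          show (((true, false) : Bool × Bool) == (false, false)) = false from rfl,
          show (((true, false) : Bool × Bool) == (false, true)) = false from rfl,
          show (((false, true) : Bool × Bool) == (false, true)) = true from rfl,
          show (((true, false) : Bool × Bool) == (true, false)) = true from rfl,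
          show (((true, true) : Bool × Bool) == (true, false)) = false from rfl,
          show (((true, true) : Bool × Bool) == (true, true)) = true from rfl,
          show (((false, true) : Bool × Bool) == (true, false)) = false from rfl,
          show (((false, true) : Bool × Bool) == (true, true)) = false from rfl,
          show (((true, false) : Bool × Bool) == (true, true)) = false from rfl]
      · simp [hcnt, hok, htr, hi, ht, hib, hnil, hsTT, PySem.Dict.get?, PySem.Dict.ofList,
          PySem.Dict.update, PySem.Dict.insert, PySem.Dict.empty, PySem.Dict.contains,
          List.find?, Nat.pos_iff_ne_zero,
          show (((false, true) : Bool × Bool) == (false, false)) = false from rfl,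
          show (((true, true) : Bool × Bool) == (false, false)) = false from rfl,
          show (((true, false) : Bool × Bool) == (false, false)) = false from rfl,
          show (((true, false) : Bool × Bool) == (false, true)) = false from rfl,
          show (((false, true) : Bool × Bool) == (false, true)) = true from rfl,
          show (((true, false) : Bool × Bool) == (true, false)) = true from rfl,
          show (((true, true) : Bool × Bool) == (true, false)) = false from rfl,
          show (((true, true) : Bool × Bool) == (true, true)) = true from rfl,
          show (((false, true) : Bool × Bool) == (true, false)) = false from rfl,
          show (((false, true) : Bool × Bool) == (true, true)) = false from rfl,
          show (((true, false) : Bool × Bool) == (true, true)) = false from rfl]
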